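-- pv_equiv track=rewrite | github.com/MintyFresh-2/google-code-jam-2021 | oli-cj-prob.py | cjfunction
-- ===== SOURCE A (Python) =====
-- def cjfunction (cj,jc,instring):
--
-- 	pattern = list(instring)
-- 	newstring = ""
-- 	cost = 0
--
-- 	for el in range (0,len(pattern)):
-- 		if pattern[el] == "?":
-- 			pattern[el]=""
-- 		newstring +=(pattern[el])
--
-- 	for x in range (0,len(newstring)-1):
-- 		if newstring[x] == "C" and newstring[x+1] == "J":
-- 			cost+= cj
-- 		elif newstring[x] == "J" and newstring[x+1] == "C":
-- 			cost+= jc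
--
-- 	return cost
-- ===== SOURCE B (Python) =====
-- def cjfunction(cj, jc, instring):
--     prev = None
--     cost = 0
--     for c in instring:
--         if c == '?':
--             continue
--         if prev == 'C' and c == 'J':
--             cost += cj
--         elif prev == 'J' and c == 'C':
--             cost += jc
--         prev = c
--     return cost
-- ===== Notes on version B (the rewrite author's own statement) =====
-- stated objective: simpler
-- what changed: B replaces A's two passes (building a cleaned intermediate string by repeated string concatenation, then an index-based scan of adjacent pairs) with one streaming pass that skips '?' and compares each kept character with the previously kept one.
import Mathlib
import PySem

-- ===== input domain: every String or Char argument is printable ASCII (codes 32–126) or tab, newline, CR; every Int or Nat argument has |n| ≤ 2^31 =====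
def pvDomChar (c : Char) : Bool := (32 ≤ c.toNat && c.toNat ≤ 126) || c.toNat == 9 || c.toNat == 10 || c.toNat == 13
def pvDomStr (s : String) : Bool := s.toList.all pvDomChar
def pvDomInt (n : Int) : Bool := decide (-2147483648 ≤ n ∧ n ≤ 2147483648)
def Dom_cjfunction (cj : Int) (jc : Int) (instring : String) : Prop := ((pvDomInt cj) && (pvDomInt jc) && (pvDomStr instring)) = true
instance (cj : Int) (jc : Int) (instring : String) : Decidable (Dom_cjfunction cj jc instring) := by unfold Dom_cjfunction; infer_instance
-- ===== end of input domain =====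

-- B does the same job in one streaming pass (skip '?', compare with the previous kept
-- character) instead of A's two passes over a materialised cleaned string; objective: simpler.

-- ===== PORT A =====
-- A builds `newstring` by an index loop over `pattern` (a '?' element is replaced by the
-- empty string before appending), then scans adjacent index pairs of `newstring`.
def cjfunction (cj : Int) (jc : Int) (instring : String) : Int :=
  let pattern := instring.toList
  let newstring : List Char :=
    (PySem.List.pyRange 0 (pattern.length : Int) 1).foldl
      (fun acc el =>
        let c := PySem.List.pyGetD pattern el ' '   -- index always in range in A's loop
        acc ++ (if c == '?' then [] else [c])) []
  (PySem.List.pyRange 0 ((newstring.length : Int) - 1) 1).foldl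
    (fun cost x =>
      if PySem.List.pyGetD newstring x ' ' == 'C' && PySem.List.pyGetD newstring (x+1) ' ' == 'J' then
        cost + cj
      else if PySem.List.pyGetD newstring x ' ' == 'J' && PySem.List.pyGetD newstring (x+1) ' ' == 'C' then
        cost + jc
      else cost) 0

-- ===== PORT B =====
def cjfunction_alt (cj : Int) (jc : Int) (instring : String) : Int :=
  (instring.toList.foldl
    (fun (st : Option Char × Int) c =>
      if c == '?' then st
      else if st.1 == some 'C' && c == 'J' then (some c, st.2 + cj)
      else if st.1 == some 'J' && c == 'C' then (some c, st.2 + jc)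
      else (some c, st.2)) (none, 0)).2

-- ===== PRECONDITION & SPEC =====
def Spec_cjfunction (cj : Int) (jc : Int) (instring : String) (out : Int) : Prop := out = cjfunction_alt cj jc instring
instance (cj : Int) (jc : Int) (instring : String) (out : Int) : Decidable (Spec_cjfunction cj jc instring out) := by unfold Spec_cjfunction; infer_instance

-- ===== CLAIM (what is proved, stated in full; the proofs are below) =====
def Claim_equal_cjfunction : Prop := ∀ (cj : Int) (jc : Int) (instring : String), Dom_cjfunction cj jc instring → Spec_cjfunction cj jc instring (cjfunction cj jc instring)

-- ===== LEMMAS AND PROOFS =====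

-- cost of one adjacent pair
def pvH (cj jc : Int) (x y : Char) : Int :=
  if x == 'C' && y == 'J' then cj else if x == 'J' && y == 'C' then jc else 0

-- sum of pvH over adjacent pairs of a list
def pvPairs (cj jc : Int) : List Char → Int
  | a :: b :: rest => pvH cj jc a b + pvPairs cj jc (b :: rest)
  | _ => 0

lemma pvLoop1_aux (l acc : List Char) :
    l.foldl (fun acc c => acc ++ (if c == '?' then [] else [c])) acc
      = acc ++ l.filter (fun c => !(c == '?')) := by
  induction l generalizing acc with
  | nil => simp
  | cons a rest ih =>
      rw [List.foldl_cons, List.filter_cons]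
      by_cases h : (a == '?') = true
      · rw [if_pos h, ih, show (!(a == '?')) = false by simp [h], if_neg (by simp)]
        simp
      · rw [if_neg h, ih, show (!(a == '?')) = true by simp_all, if_pos rfl]
        simp

-- A's first loop is the filter of the char list
lemma pvLoop1 (l : List Char) :
    (PySem.List.pyRange 0 (l.length : Int) 1).foldl
      (fun acc el =>
        let c := PySem.List.pyGetD l el ' '
        acc ++ (if c == '?' then [] else [c])) [] = l.filter (fun c => !(c == '?')) := by
  rw [PySem.List.foldl_pyRange_zero_pyGetD' (f := fun acc c => acc ++ (if c == '?' then [] else [c]))]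
  simpa using pvLoop1_aux l []

-- A's second loop over Nat indices
lemma pvLoop2_nat (cj jc : Int) (ns : List Char) (cost : Int) :
    (List.range (ns.length - 1)).foldl
      (fun cost k => cost + pvH cj jc (ns.getD k ' ') (ns.getD (k+1) ' ')) cost
      = cost + pvPairs cj jc ns := by
  induction ns generalizing cost with
  | nil => simp [pvPairs]
  | cons a rest ih =>
      cases rest with
      | nil => simp [pvPairs]
      | cons b r =>
          rw [show (a :: b :: r).length - 1 = r.length + 1 by simp,
              List.range_succ_eq_map, List.foldl_cons, List.foldl_map]
          show List.foldl
              (fun c k => c + pvH cj jc ((b :: r).getD k ' ') ((b :: r).getD (k+1) ' '))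
              (cost + pvH cj jc a b) (List.range r.length)
            = cost + pvPairs cj jc (a :: b :: r)
          rw [show r.length = (b :: r).length - 1 from rfl, ih]
          simp [pvPairs, add_assoc]

-- one non-'?' step of B's fold, written through pvH
lemma pvStep (cj jc : Int) (st : Option Char × Int) (c : Char) (h : (c == '?') = false) :
    (if (c == '?') = true then st
     else if (st.1 == some 'C' && c == 'J') = true then (some c, st.2 + cj)
     else if (st.1 == some 'J' && c == 'C') = true then (some c, st.2 + jc)
     else (some c, st.2))
    = (some c, st.2 + pvH cj jc (st.1.getD '?') c) := by
  rcases st with ⟨p, t⟩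
  rcases p with _ | pc <;>
    simp only [pvH, Option.getD_none, Option.getD_some, h, Bool.false_eq_true, if_false] <;>
    · split_ifs <;> simp_all

-- B's fold with the '?'-skip equals the pvH pair-fold on the filtered list
lemma pvSkip (cj jc : Int) (l : List Char) (st : Option Char × Int) :
    l.foldl
      (fun (st : Option Char × Int) c =>
        if c == '?' then st
        else if st.1 == some 'C' && c == 'J' then (some c, st.2 + cj)
        else if st.1 == some 'J' && c == 'C' then (some c, st.2 + jc)
        else (some c, st.2)) st
    = (l.filter (fun c => !(c == '?'))).foldl
      (fun (st : Option Char × Int) c =>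
        (some c, st.2 + pvH cj jc (st.1.getD '?') c)) st := by
  induction l generalizing st with
  | nil => rfl
  | cons a rest ih =>
      by_cases h : (a == '?') = true
      · rw [List.foldl_cons, if_pos h, show List.filter (fun c => !(c == '?')) (a :: rest)
              = List.filter (fun c => !(c == '?')) rest by simp [h]]
        exact ih st
      · have hf : (a == '?') = false := by simp_all
        rw [List.foldl_cons,
            show List.filter (fun c => !(c == '?')) (a :: rest)
              = a :: List.filter (fun c => !(c == '?')) rest by simp [hf],
            List.foldl_cons, pvStep cj jc st a hf]
        exact ih _

-- the pair-fold computes pvPairs, threading the previous character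
lemma pvPairFold (cj jc : Int) (l : List Char) (p : Char) (c : Int) :
    ((l.foldl (fun (st : Option Char × Int) c => (some c, st.2 + pvH cj jc (st.1.getD '?') c)) (some p, c)).2)
    = c + pvPairs cj jc (p :: l) := by
  induction l generalizing p c with
  | nil => simp [pvPairs]
  | cons a rest ih =>
      simp only [List.foldl_cons, Option.getD_some]
      rw [ih]
      simp [pvPairs, add_assoc]

lemma pvPairFoldNone (cj jc : Int) (l : List Char) :
    ((l.foldl (fun (st : Option Char × Int) c => (some c, st.2 + pvH cj jc (st.1.getD '?') c)) (none, 0)).2)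
    = pvPairs cj jc l := by
  cases l with
  | nil => rfl
  | cons a rest =>
      simp only [List.foldl_cons, Option.getD_none]
      have hH : pvH cj jc '?' a = 0 := by simp [pvH]
      rw [hH, pvPairFold]
      simp

-- bridge A's Int-indexed second loop to the Nat-indexed one
lemma pvLoop2 (cj jc : Int) (ns : List Char) :
    (PySem.List.pyRange 0 ((ns.length : Int) - 1) 1).foldl
      (fun cost x =>
        if PySem.List.pyGetD ns x ' ' == 'C' && PySem.List.pyGetD ns (x+1) ' ' == 'J' then cost + cj
        else if PySem.List.pyGetD ns x ' ' == 'J' && PySem.List.pyGetD ns (x+1) ' ' == 'C' then cost + jc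
        else cost) 0 = pvPairs cj jc ns := by
  rw [PySem.List.pyRange_one]
  have hcast : (((ns.length : Int) - 1) - 0).toNat = ns.length - 1 := by omega
  rw [hcast, List.foldl_map]
  rw [List.foldl_ext _ (fun (cost : Int) (k : Nat) => cost + pvH cj jc (ns.getD k ' ') (ns.getD (k+1) ' ')) 0
    (by
      intro cost k _
      have h1 : PySem.List.pyGetD ns ((0:Int) + k) ' ' = ns.getD k ' ' := by
        rw [show ((0:Int) + k) = ((k : Nat) : Int) by omega, PySem.List.pyGetD_natCast]
      have h2 : PySem.List.pyGetD ns ((0:Int) + k + 1) ' ' = ns.getD (k+1) ' ' := by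
        rw [show ((0:Int) + k + 1) = ((k + 1 : Nat) : Int) by push_cast; ring, PySem.List.pyGetD_natCast]
      simp only [h1, h2, pvH]
      split_ifs <;> simp_all)]
  simpa using pvLoop2_nat cj jc ns 0

-- ===== VERDICT (by name: the statement is the Claim_ definition above) =====
theorem cjfunction_spec : Claim_equal_cjfunction := by
  intro cj jc instring _
  show cjfunction cj jc instring = cjfunction_alt cj jc instring
  unfold cjfunction cjfunction_alt
  simp only []
  rw [pvLoop1, pvLoop2, pvSkip, pvPairFoldNone]
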